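-- pv_equiv track=rewrite | github.com/Lyrete/adventofcode | 2023/16.py | solve
-- ===== SOURCE A (Python) =====
-- def new_directions(symbol: str, direction: tuple[int, int]) -> list[tuple[int, int]]:
--     dx, dy = direction
--     match symbol:
--         case ".":
--             return [(dx, dy)]
--         case "/":
--             return [(-dy, -dx)]
--         case "\\":
--             return [(dy, dx)]
--         case "-":
--             if dy == 0:
--                 return [(dx, dy)]
--             return [(1, 0), (-1, 0)]
--         case "|":
--             if dx == 0:
--                 return [(dx, dy)]
--             return [(0, 1), (0, -1)]
--
-- def traverse(start: tuple[int, int], direction: tuple[int, int], board: list[list[str]], visited: dict = {}):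
--
--     # Exit out of traverse when we go outside the grid
--     if start[0] < 0 or start[1] < 0 or start[1] > len(board) - 1 or start[0] > len(board[0]) - 1:
--         return
--
--     if start not in visited:
--         visited[start] = [direction]
--     elif direction in visited[start]:
--         return
--
--     visited[start].append(direction)
--     x, y = start
--
--     sym = board[y][x]
--
--     for dir in new_directions(sym, direction):
--         traverse((x + dir[0], y + dir[1]), dir, board, visited)
--
--     return len(visited)
--
-- def parse(s: str) -> list[list[str]]:
--     lines = s.strip().splitlines()
--     board = []
--     for y in range(len(lines)):
--         board.append([])
--         for c in lines[y]:
--             board[y].append(c)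
--
--     return board
--
-- def solve(s: str) -> tuple[int, int]:
--     board = parse(s)
--
--     s1 = traverse((0, 0), (1, 0), board, {})
--
--     s2 = s1
--
--     for x in range(len(board[0])):
--         s2 = max(s2, traverse((x, 0), (0, 1), board, {}))
--
--     for x in range(len(board[0])):
--         s2 = max(s2, traverse((x, len(board) - 1), (0, -1), board, {}))
--
--     for y in range(len(board)):
--         s2 = max(s2, traverse((0, y), (1, 0), board, {}))
--
--     for y in range(len(board)):
--         s2 = max(s2, traverse((len(board[0]) - 1, y), (-1, 0), board, {}))
--
--     return s1, s2
-- ===== SOURCE B (Python) =====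
-- def new_directions(symbol: str, direction: tuple[int, int]) -> list[tuple[int, int]]:
--     dx, dy = direction
--     match symbol:
--         case ".":
--             return [(dx, dy)]
--         case "/":
--             return [(-dy, -dx)]
--         case "\\":
--             return [(dy, dx)]
--         case "-":
--             if dy == 0:
--                 return [(dx, dy)]
--             return [(1, 0), (-1, 0)]
--         case "|":
--             if dx == 0:
--                 return [(dx, dy)]
--             return [(0, 1), (0, -1)]
--
-- def parse(s: str) -> list[list[str]]:
--     return [list(line) for line in s.strip().splitlines()]
--
-- def traverse(start, direction, board):
--     h = len(board)
--     w = len(board[0])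
--     seen = set()
--     cells = set()
--     stack = [(start, direction)]
--     while stack:
--         (x, y), d = stack.pop()
--         if x < 0 or y < 0 or y >= h or x >= w:
--             continue
--         if ((x, y), d) in seen:
--             continue
--         seen.add(((x, y), d))
--         cells.add((x, y))
--         # push children reversed so they are explored left-to-right
--         for nd in reversed(new_directions(board[y][x], d)):
--             stack.append(((x + nd[0], y + nd[1]), nd))
--     return len(cells)
--
-- def solve(s: str) -> tuple[int, int]:
--     board = parse(s)
--     w, h = len(board[0]), len(board)
--     s1 = traverse((0, 0), (1, 0), board)
--     starts = ([((x, 0), (0, 1)) for x in range(w)]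
--               + [((x, h - 1), (0, -1)) for x in range(w)]
--               + [((0, y), (1, 0)) for y in range(h)]
--               + [((w - 1, y), (-1, 0)) for y in range(h)])
--     s2 = max([s1] + [traverse(c, d, board) for c, d in starts])
--     return s1, s2
-- ===== Notes on version B (the rewrite author's own statement) =====
-- stated objective: alternative
-- what changed: traverse's self-recursion over a visited dict {cell: [directions]} is replaced by an explicit LIFO-stack worklist over (cell, direction) states with a seen set and an energized-cell set, and solve's five sequential max loops become one max over a list of all edge entry points.
-- outside the precondition, e.g. on solve('.-.\n|a|\n.-.'): A returns (3, 3), B returns (3, 3)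
import Mathlib
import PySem

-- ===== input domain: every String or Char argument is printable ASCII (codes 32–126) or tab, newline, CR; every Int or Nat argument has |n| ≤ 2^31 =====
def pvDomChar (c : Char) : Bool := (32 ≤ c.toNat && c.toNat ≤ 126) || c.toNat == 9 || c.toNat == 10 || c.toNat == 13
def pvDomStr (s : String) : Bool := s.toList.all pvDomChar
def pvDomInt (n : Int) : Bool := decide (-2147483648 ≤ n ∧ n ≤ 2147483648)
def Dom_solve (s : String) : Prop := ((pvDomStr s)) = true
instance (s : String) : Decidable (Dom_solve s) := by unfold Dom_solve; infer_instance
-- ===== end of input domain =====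

-- B re-implements the recursive beam walk of `traverse` as an explicit LIFO-stack loop over
-- (cell, direction) states with a seen-set and an energized-cell set; same return values on Pre_.

-- ===== PORT A =====

-- shared with B (Source B keeps new_directions verbatim); Python's fall-through returns None,
-- on which the caller's 'for dir in …' raises TypeError — those inputs are excluded by Pre_
def newDirections (symbol : Char) (direction : Int × Int) : Option (List (Int × Int)) :=
  let dx := direction.1
  let dy := direction.2
  if symbol = '.' then some [(dx, dy)]
  else if symbol = '/' then some [(-dy, -dx)]
  else if symbol = '\\' then some [(dy, dx)]
  else if symbol = '-' then (if dy = 0 then some [(dx, dy)] else some [(1, 0), (-1, 0)])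
  else if symbol = '|' then (if dx = 0 then some [(dx, dy)] else some [(0, 1), (0, -1)])
  else none

-- fuel/termination scaffolding shared by both ports (not part of either Python algorithm):
-- the four unit directions and the finite universe of (cell, direction) states of a w×h grid
def dirs4 : List (Int × Int) := [(1, 0), (-1, 0), (0, 1), (0, -1)]

def allStates (w h : Int) : List ((Int × Int) × (Int × Int)) :=
  (PySem.List.pyRange 0 w 1).flatMap fun x =>
    (PySem.List.pyRange 0 h 1).flatMap fun y => dirs4.map fun d => ((x, y), d)

-- A's recursive traverse, on the visited dict {cell: [directions]}.  The fuel argument is a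
-- totality device only (Python has none): every call made by `solve` carries enough fuel.
def travA (board : List (List Char)) :
    Nat → Int × Int → Int × Int → PySem.Dict (Int × Int) (List (Int × Int)) →
      PySem.Dict (Int × Int) (List (Int × Int))
  | 0, _, _, visited => visited
  | fuel + 1, start, direction, visited =>
    -- exit when we go outside the grid (len(board[0]) raises IndexError on []; excluded by Pre_)
    if start.1 < 0 ∨ start.2 < 0 ∨ start.2 > PySem.List.len board - 1 ∨
        start.1 > PySem.List.len ((PySem.List.pyGet? board 0).getD []) - 1 then visited
    else
      let body := fun (v1 : PySem.Dict (Int × Int) (List (Int × Int))) =>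
        let v2 := v1.modify start [] (fun l => l ++ [direction])  -- visited[start].append(direction)
        let x := start.1
        let y := start.2
        let sym := (PySem.List.pyGet? ((PySem.List.pyGet? board y).getD []) x).getD ' '  -- board[y][x]; IndexError excluded by Pre_
        match newDirections sym direction with
        | none => v2  -- Python raises TypeError here; excluded by Pre_
        | some nds => nds.foldl (fun acc dir => travA board fuel (x + dir.1, y + dir.2) dir acc) v2
      if visited.contains start = false then body (visited.insert start [direction])
      else if direction ∈ visited.getD start [] then visited
      else body visited

-- Python's traverse returns len(visited), or None when the start is off the board
-- (then solve's max(...) would raise TypeError; excluded by Pre_)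
def traverseA (start direction : Int × Int) (board : List (List Char)) : Option Int :=
  if start.1 < 0 ∨ start.2 < 0 ∨ start.2 > PySem.List.len board - 1 ∨
      start.1 > PySem.List.len ((PySem.List.pyGet? board 0).getD []) - 1 then none
  else
    some ((travA board
      ((allStates (PySem.List.len ((PySem.List.pyGet? board 0).getD [])) (PySem.List.len board)).length + 1)
      start direction PySem.Dict.empty).size : Int)

def parseA (s : String) : List (List Char) :=
  let lines := PySem.Str.splitlines (PySem.Str.strip s)
  (PySem.List.pyRange 0 (PySem.List.len lines) 1).foldl
    (fun board y =>
      let board := board ++ [([] : List Char)]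
      (((PySem.List.pyGet? lines y).getD "").toList).foldl
        (fun b c => PySem.List.pySetD b y (PySem.List.pyGetD b y [] ++ [c])) board)
    []

-- max(acc, t) where t may be None (then Python raises TypeError; excluded by Pre_)
def pyMaxOpt (acc : Int) (t : Option Int) : Int :=
  match t with
  | some k => max acc k
  | none => acc

def solve (s : String) : Int × Int :=
  let board := parseA s
  let w := PySem.List.len ((PySem.List.pyGet? board 0).getD [])  -- len(board[0]); IndexError on [] excluded by Pre_
  let h := PySem.List.len board
  let s1 := (traverseA (0, 0) (1, 0) board).getD 0  -- None would make the max() below raise; excluded by Pre_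
  let s2 := (PySem.List.pyRange 0 w 1).foldl (fun acc x => pyMaxOpt acc (traverseA (x, 0) (0, 1) board)) s1
  let s2 := (PySem.List.pyRange 0 w 1).foldl (fun acc x => pyMaxOpt acc (traverseA (x, h - 1) (0, -1) board)) s2
  let s2 := (PySem.List.pyRange 0 h 1).foldl (fun acc y => pyMaxOpt acc (traverseA (0, y) (1, 0) board)) s2
  let s2 := (PySem.List.pyRange 0 h 1).foldl (fun acc y => pyMaxOpt acc (traverseA (w - 1, y) (-1, 0) board)) s2
  (s1, s2)

-- ===== PORT B =====

-- termination lemma for the stack loop (cited in decreasing_by): marking a fresh state of the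
-- finite universe strictly shrinks the count of unmarked universe states
theorem pvCountP_flip_lt {α : Type} (l : List α) (p q : α → Bool)
    (himp : ∀ a, q a = true → p a = true) (st : α)
    (hl : st ∈ l) (hp : p st = true) (hq : q st = false) :
    l.countP q < l.countP p := by
  induction l with
  | nil => cases hl
  | cons a t ih =>
    rcases List.mem_cons.mp hl with rfl | hmem
    · have := List.countP_mono_left (l := t) (p := q) (q := p) (fun x _ h => himp x h)
      simp only [List.countP_cons, hp, hq]
      simp
      omega
    · by_cases hqa : q a = true
      · simp only [List.countP_cons, hqa, himp a hqa]
        have := ih hmem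
        omega
      · simp only [List.countP_cons, hqa]
        have := ih hmem
        by_cases hpa : p a = true <;> simp [hpa] <;> omega

def unseenCnt (w h : Int) (seen : PySem.Set ((Int × Int) × (Int × Int))) : Nat :=
  (allStates w h).countP (fun st => !(decide (st ∈ seen)))

theorem pvMem_allStates {w h : Int} {st : (Int × Int) × (Int × Int)} :
    st ∈ allStates w h ↔ 0 ≤ st.1.1 ∧ st.1.1 < w ∧ 0 ≤ st.1.2 ∧ st.1.2 < h ∧ st.2 ∈ dirs4 := by
  obtain ⟨⟨x, y⟩, d⟩ := st
  simp only [allStates, List.mem_flatMap, List.mem_map, PySem.List.mem_pyRange_one]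
  constructor
  · rintro ⟨a, ⟨ha0, haw⟩, b, ⟨hb0, hbh⟩, d', hd', h⟩
    obtain ⟨h1, h2⟩ := Prod.mk.injEq .. ▸ h
    cases h1; cases h2
    exact ⟨ha0, haw, hb0, hbh, hd'⟩
  · rintro ⟨h1, h2, h3, h4, h5⟩
    exact ⟨x, ⟨h1, h2⟩, y, ⟨h3, h4⟩, d, h5, rfl⟩

theorem pvUnseen_add_lt (w h : Int) (seen : PySem.Set ((Int × Int) × (Int × Int)))
    (st : (Int × Int) × (Int × Int)) (hmem : st ∈ allStates w h) (hns : st ∉ seen) :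
    unseenCnt w h (PySem.Set.add seen st) < unseenCnt w h seen := by
  refine pvCountP_flip_lt _ _ _ (fun a ha => ?_) st hmem ?_ ?_
  · simp only [Bool.not_eq_true', decide_eq_false_iff_not] at ha ⊢
    exact fun hmem' => ha ((PySem.Set.mem_add _ _ _).mpr (Or.inl hmem'))
  · simp [hns]
  · simp [PySem.Set.mem_add]

-- B's traverse: explicit stack of (cell, direction) states; pushing reversed(children) onto a
-- LIFO stack is prepending the children in order, so the stack top is the list head here.
def loopB (board : List (List Char)) (w h : Int) :
    List ((Int × Int) × (Int × Int)) → PySem.Set ((Int × Int) × (Int × Int)) →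
      PySem.Set (Int × Int) → Int
  | [], _, cells => PySem.Set.len cells
  | (c, d) :: rest, seen, cells =>
    if c.1 < 0 ∨ c.2 < 0 ∨ c.2 ≥ h ∨ c.1 ≥ w then loopB board w h rest seen cells
    else if (c, d) ∈ seen then loopB board w h rest seen cells
    else if hd : d ∈ dirs4 then
      let sym := (PySem.List.pyGet? ((PySem.List.pyGet? board c.2).getD []) c.1).getD ' '  -- board[y][x]; IndexError excluded by Pre_
      let nds := (newDirections sym d).getD []  -- none → Python TypeError; excluded by Pre_
      loopB board w h (nds.map (fun nd => ((c.1 + nd.1, c.2 + nd.2), nd)) ++ rest)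
        (PySem.Set.add seen (c, d)) (PySem.Set.add cells c)
    else loopB board w h rest seen cells
    -- final branch: totality guard; every direction the Python program ever pushes is one of
    -- the four unit vectors, so this branch is unreachable in runs admitted by Pre_
termination_by stack seen _ => (unseenCnt w h seen, stack.length)
decreasing_by
  · exact Prod.Lex.right _ (Nat.lt_succ_self _)
  · exact Prod.Lex.right _ (Nat.lt_succ_self _)
  · apply Prod.Lex.left
    apply pvUnseen_add_lt
    · apply pvMem_allStates.mpr
      rename_i hoob hseen
      push Not at hoob
      refine ⟨?_, ?_, ?_, ?_, hd⟩ <;> simp only [] <;> omega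
    · rename_i hoob hseen
      exact hseen
  · exact Prod.Lex.right _ (Nat.lt_succ_self _)

def traverseB (start direction : Int × Int) (board : List (List Char)) : Int :=
  let h := PySem.List.len board
  let w := PySem.List.len ((PySem.List.pyGet? board 0).getD [])  -- len(board[0]); excluded by Pre_ on []
  loopB board w h [(start, direction)] PySem.Set.empty PySem.Set.empty

def parseB (s : String) : List (List Char) :=
  (PySem.Str.splitlines (PySem.Str.strip s)).map (fun line => line.toList)

def solve_alt (s : String) : Int × Int :=
  let board := parseB s
  let w := PySem.List.len ((PySem.List.pyGet? board 0).getD [])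
  let h := PySem.List.len board
  let s1 := traverseB (0, 0) (1, 0) board
  let starts :=
    ((PySem.List.pyRange 0 w 1).map fun x => ((x, 0), ((0 : Int), (1 : Int))))
      ++ ((PySem.List.pyRange 0 w 1).map fun x => ((x, h - 1), ((0 : Int), (-1 : Int))))
      ++ ((PySem.List.pyRange 0 h 1).map fun y => (((0 : Int), y), ((1 : Int), (0 : Int))))
      ++ ((PySem.List.pyRange 0 h 1).map fun y => ((w - 1, y), ((-1 : Int), (0 : Int))))
  let s2 := (PySem.List.max? (s1 :: starts.map (fun p => traverseB p.1 p.2 board))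
    (fun y => y)).getD 0  -- the list is nonempty, getD's default is never used
  (s1, s2)

-- ===== PRECONDITION & SPEC =====

def goodSyms : List Char := ['.', '/', '\\', '-', '|']

-- Pre_ excludes the inputs on which A can raise: an empty grid (IndexError on board[0]), a row
-- shorter than the first row (IndexError when the beam reaches it), or a character other than
-- ./\-| in the first-row-width columns (TypeError when the beam reaches it); whether A actually
-- raises depends on beam reachability, and on excluded grids whose offending cells are never
-- reached A returns and B returns the very same value.
def Pre_solve (s : String) : Prop :=
  let lines := PySem.Str.splitlines (PySem.Str.strip s)
  lines ≠ [] ∧ 1 ≤ (lines.headD "").toList.length ∧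
    ∀ line ∈ lines, (lines.headD "").toList.length ≤ line.toList.length ∧
      (line.toList.take (lines.headD "").toList.length).all
        (fun c => goodSyms.contains c) = true

instance (s : String) : Decidable (Pre_solve s) := by unfold Pre_solve; infer_instance

def pvWitness_solve : String := ".|\n-."

def Spec_solve (s : String) (out : Int × Int) : Prop := out = solve_alt s

instance (s : String) (out : Int × Int) : Decidable (Spec_solve s out) := by
  unfold Spec_solve; infer_instance

-- ===== CLAIM (what is proved, stated in full; the proofs are below) =====
def Claim_equal_solve : Prop := ∀ (s : String), Dom_solve s → Pre_solve s → Spec_solve s (solve s)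

-- ===== LEMMAS AND PROOFS =====

-- ---------- proof-side notions ----------

abbrev pvVis := PySem.Dict (Int × Int) (List (Int × Int))
abbrev pvSt := (Int × Int) × (Int × Int)

def pairMem (v : pvVis) (st : pvSt) : Bool := decide (st.2 ∈ v.getD st.1 [])

def pairsOf (v : pvVis) : PySem.Set pvSt :=
  v.items.flatMap (fun kv => kv.2.map (fun d => (kv.1, d)))

def InvD (v : pvVis) (seen : PySem.Set pvSt) (cells : PySem.Set (Int × Int)) : Prop :=
  v.keys.Nodup ∧ cells = v.keys ∧ ∀ st : pvSt, st ∈ seen ↔ pairMem v st = true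

def muA (w h : Int) (v : pvVis) : Nat := (allStates w h).countP (fun st => !(pairMem v st))

def boardW (board : List (List Char)) : Int :=
  PySem.List.len ((PySem.List.pyGet? board 0).getD [])

def BoardOK (board : List (List Char)) : Prop :=
  board ≠ [] ∧ 1 ≤ boardW board ∧
    ∀ row ∈ board, (boardW board).toNat ≤ row.length ∧
      ∀ c ∈ row.take (boardW board).toNat, c ∈ goodSyms

-- the dict update A performs on a fresh (cell, direction) pair
def stepV (v : pvVis) (c d : Int × Int) : pvVis :=
  (if v.contains c = false then v.insert c [d] else v).modify c [] (fun l => l ++ [d])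

theorem pairMem_empty (st : pvSt) : pairMem PySem.Dict.empty st = false := by
  simp [pairMem, PySem.Dict.getD_empty]

theorem mem_pairsOf {v : pvVis} (hnd : v.keys.Nodup) (st : pvSt) :
    st ∈ pairsOf v ↔ pairMem v st = true := by
  obtain ⟨c, d⟩ := st
  simp only [pairsOf, List.mem_flatMap, List.mem_map, pairMem, decide_eq_true_eq]
  constructor
  · rintro ⟨⟨k, l⟩, hkl, d', hd', heq⟩
    cases heq
    rw [PySem.Dict.getD_of_mem_items v hkl hnd]
    exact hd'
  · intro hmem
    rcases hget : v.get? c with _ | l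
    · rw [PySem.Dict.getD_eq_get?_getD, hget] at hmem
      simp at hmem
    · refine ⟨(c, l), PySem.Dict.mem_items_of_get?_eq_some v hget, d, ?_, rfl⟩
      rwa [PySem.Dict.getD_eq_get?_getD, hget] at hmem

theorem InvD_canonical {v : pvVis} (hnd : v.keys.Nodup) : InvD v (pairsOf v) v.keys :=
  ⟨hnd, rfl, fun st => mem_pairsOf hnd st⟩

theorem pairMem_stepV (v : pvVis) (c d : Int × Int) (q : pvSt) :
    pairMem (stepV v c d) q = (pairMem v q || decide (q = (c, d))) := by
  obtain ⟨qc, qd⟩ := q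
  simp only [stepV, pairMem]
  by_cases hq : qc = c
  · subst hq
    by_cases hcont : v.contains qc = false
    · simp [hcont, PySem.Dict.getD_insert_self,
        PySem.Dict.getD_of_not_contains v _ hcont, Prod.ext_iff]
    · simp [hcont, Prod.ext_iff]
  · by_cases hcont : v.contains c = false
    · simp [PySem.Dict.getD_modify, hq, hcont, PySem.Dict.getD_insert_of_ne v _ _ hq,
        Prod.ext_iff]
    · simp [PySem.Dict.getD_modify, hq, hcont, Prod.ext_iff]

theorem keys_stepV (v : pvVis) (c d : Int × Int) :
    (stepV v c d).keys = if v.contains c = true then v.keys else v.keys ++ [c] := by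
  by_cases hcont : v.contains c = true
  · rw [if_pos hcont]
    simp only [stepV, hcont]
    rw [if_neg (by simp), PySem.Dict.keys_modify, PySem.Dict.keys_insert_of_contains v _ hcont]
  · have hf : v.contains c = false := by simpa using hcont
    rw [if_neg hcont]
    simp only [stepV, hf, if_true]
    rw [PySem.Dict.keys_modify,
      PySem.Dict.keys_insert_of_contains _ _ (by simp),
      PySem.Dict.keys_insert_of_not_contains v _ hf]

theorem nodup_stepV {v : pvVis} (c d : Int × Int) (hnd : v.keys.Nodup) :
    (stepV v c d).keys.Nodup := by
  rw [keys_stepV]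
  by_cases hcont : v.contains c = true
  · simpa [hcont]
  · have hcm : c ∉ v.keys := fun hmem => hcont ((PySem.Dict.contains_iff_mem_keys v c).mpr hmem)
    simp [hcont, List.nodup_append, hnd]
    exact fun a b hab heq => hcm (heq ▸ hab)

theorem muA_stepV_lt {w h : Int} {v : pvVis} {c d : Int × Int}
    (hc : 0 ≤ c.1 ∧ c.1 < w ∧ 0 ≤ c.2 ∧ c.2 < h) (hd : d ∈ dirs4)
    (hfresh : pairMem v (c, d) = false) :
    muA w h (stepV v c d) < muA w h v := by
  refine pvCountP_flip_lt _ _ _ (fun a ha => ?_)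
    (c, d) (pvMem_allStates.mpr ⟨hc.1, hc.2.1, hc.2.2.1, hc.2.2.2, hd⟩) ?_ ?_
  · simp only [Bool.not_eq_true', pairMem_stepV, Bool.or_eq_false_iff] at ha ⊢
    exact ha.1
  · simp [hfresh]
  · simp [pairMem_stepV]

-- monotonicity of A's recursion: visited pairs are never removed, keys stay Nodup
theorem travA_mono (board : List (List Char)) :
    ∀ (fuel : Nat) (c d : Int × Int) (v : pvVis),
      (∀ q : pvSt, pairMem v q = true → pairMem (travA board fuel c d v) q = true) ∧
      (v.keys.Nodup → (travA board fuel c d v).keys.Nodup) := by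
  intro fuel
  induction fuel with
  | zero => intro c d v; exact ⟨fun q h => h, fun h => h⟩
  | succ f ih =>
    have hfold : ∀ (l : List (Int × Int)) (x y : Int) (v : pvVis),
        (∀ q : pvSt, pairMem v q = true →
          pairMem (l.foldl (fun acc dir => travA board f (x + dir.1, y + dir.2) dir acc) v) q
            = true) ∧
        (v.keys.Nodup →
          (l.foldl (fun acc dir => travA board f (x + dir.1, y + dir.2) dir acc) v).keys.Nodup)
        := by
      intro l x y
      induction l with
      | nil => intro v; exact ⟨fun q h => h, fun h => h⟩
      | cons a t iht =>
        intro v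
        simp only [List.foldl_cons]
        exact ⟨fun q h => (iht _).1 q ((ih _ _ _).1 q h),
               fun h => (iht _).2 ((ih _ _ _).2 h)⟩
    intro c d v
    have hstep1 : v.contains c = false →
        (v.insert c [d]).modify c [] (fun l => l ++ [d]) = stepV v c d := by
      intro hcf; rw [stepV, if_pos hcf]
    have hstep2 : ¬ v.contains c = false →
        v.modify c [] (fun l => l ++ [d]) = stepV v c d := by
      intro hct; rw [stepV, if_neg hct]
    simp only [travA]
    split_ifs with hoob hcont hmem
    · exact ⟨fun q h => h, fun h => h⟩
    · rw [hstep1 hcont]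
      cases hnds : newDirections
          ((PySem.List.pyGet? ((PySem.List.pyGet? board c.2).getD []) c.1).getD ' ') d with
      | none =>
        exact ⟨fun q h => by simp [pairMem_stepV, h], fun h => nodup_stepV _ _ h⟩
      | some nds =>
        exact ⟨fun q h => (hfold nds c.1 c.2 _).1 q (by simp [pairMem_stepV, h]),
               fun h => (hfold nds c.1 c.2 _).2 (nodup_stepV _ _ h)⟩
    · exact ⟨fun q h => h, fun h => h⟩
    · rw [hstep2 hcont]
      cases hnds : newDirections
          ((PySem.List.pyGet? ((PySem.List.pyGet? board c.2).getD []) c.1).getD ' ') d with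
      | none =>
        exact ⟨fun q h => by simp [pairMem_stepV, h], fun h => nodup_stepV _ _ h⟩
      | some nds =>
        exact ⟨fun q h => (hfold nds c.1 c.2 _).1 q (by simp [pairMem_stepV, h]),
               fun h => (hfold nds c.1 c.2 _).2 (nodup_stepV _ _ h)⟩

theorem muA_travA_le (board : List (List Char)) (w h : Int) (fuel : Nat)
    (c d : Int × Int) (v : pvVis) : muA w h (travA board fuel c d v) ≤ muA w h v := by
  refine List.countP_mono_left (fun st _ hst => ?_)
  simp only [Bool.not_eq_true'] at hst ⊢
  cases hq : pairMem v st
  · rfl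
  · rw [(travA_mono board fuel c d v).1 st hq] at hst
    exact hst

theorem newDirections_good {sym : Char} {d : Int × Int} (hs : sym ∈ goodSyms)
    (hd : d ∈ dirs4) :
    ∃ nds, newDirections sym d = some nds ∧ ∀ d' ∈ nds, d' ∈ dirs4 := by
  fin_cases hs <;> fin_cases hd <;> exact ⟨_, rfl, by decide⟩

theorem nds_len_le (sym : Char) (d : Int × Int) :
    ((newDirections sym d).getD []).length ≤ 2 := by
  by_cases h2 : d.2 = 0 <;> by_cases h1 : d.1 = 0 <;>
    unfold newDirections <;> split_ifs <;> simp_all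

theorem sym_good {board : List (List Char)} (hB : BoardOK board) {x y : Int}
    (hx : 0 ≤ x ∧ x < boardW board) (hy : 0 ≤ y ∧ y < PySem.List.len board) :
    ((PySem.List.pyGet? ((PySem.List.pyGet? board y).getD []) x).getD ' ') ∈ goodSyms := by
  have hyn : y.toNat < board.length := by
    have := hy.2
    simp [PySem.List.len] at this ⊢
    omega
  have hrow : PySem.List.pyGet? board y = some board[y.toNat] := by
    rw [PySem.List.pyGet?_of_nonneg _ hy.1]
    exact List.getElem?_eq_getElem hyn
  rw [hrow]
  have hmem := List.getElem_mem hyn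
  obtain ⟨hlen, hchars⟩ := hB.2.2 _ hmem
  have hxn : x.toNat < (boardW board).toNat := by
    have h1 := hx.1
    have h2 := hx.2
    omega
  have hxlen : x.toNat < board[y.toNat].length := lt_of_lt_of_le hxn hlen
  have hcell : PySem.List.pyGet? board[y.toNat] x = some board[y.toNat][x.toNat] := by
    rw [PySem.List.pyGet?_of_nonneg _ hx.1]
    exact List.getElem?_eq_getElem hxlen
  simp only [Option.getD_some, hcell]
  refine hchars _ ?_
  have htake : (board[y.toNat].take (boardW board).toNat)[x.toNat]'(by
      simp [List.length_take]; omega) = board[y.toNat][x.toNat] := List.getElem_take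
  rw [← htake]
  exact List.getElem_mem _

-- loopB depends on `seen` only through membership
theorem loopB_congr (board : List (List Char)) (w h : Int) :
    ∀ (N : Nat) (stack : List pvSt) (seen1 : PySem.Set pvSt) (cells : PySem.Set (Int × Int))
      (seen2 : PySem.Set pvSt),
      4 * unseenCnt w h seen1 + stack.length ≤ N →
      (∀ st : pvSt, st ∈ seen1 ↔ st ∈ seen2) →
      loopB board w h stack seen1 cells = loopB board w h stack seen2 cells := by
  intro N
  induction N with
  | zero =>
    intro stack seen1 cells seen2 hN hmem
    have : stack = [] := by
      cases stack with
      | nil => rfl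
      | cons a t => simp at hN
    subst this
    rw [loopB, loopB]
  | succ N ihN =>
    intro stack seen1 cells seen2 hN hmem
    cases stack with
    | nil => rw [loopB, loopB]
    | cons st rest =>
      obtain ⟨c, d⟩ := st
      rw [loopB, loopB]
      by_cases hoob : c.1 < 0 ∨ c.2 < 0 ∨ c.2 ≥ h ∨ c.1 ≥ w
      · rw [if_pos hoob, if_pos hoob]
        exact ihN rest seen1 cells seen2 (by simp at hN ⊢; omega) hmem
      · rw [if_neg hoob, if_neg hoob]
        by_cases hsn : (c, d) ∈ seen1
        · rw [if_pos hsn, if_pos ((hmem _).mp hsn)]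
          exact ihN rest seen1 cells seen2 (by simp at hN ⊢; omega) hmem
        · rw [if_neg hsn, if_neg (fun hx => hsn ((hmem _).mpr hx))]
          by_cases hd : d ∈ dirs4
          · rw [dif_pos hd, dif_pos hd]
            have hmem' : ∀ st : pvSt, st ∈ seen1.add (c, d) ↔ st ∈ seen2.add (c, d) := by
              intro st
              rw [PySem.Set.mem_add, PySem.Set.mem_add]
              exact or_congr (hmem st) Iff.rfl
            refine ihN _ _ _ _ ?_ hmem'
            have hdec : unseenCnt w h (seen1.add (c, d)) < unseenCnt w h seen1 := by
              refine pvUnseen_add_lt w h seen1 (c, d) (pvMem_allStates.mpr ?_) hsn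
              have hb : (0:Int) ≤ c.1 ∧ c.1 < w ∧ 0 ≤ c.2 ∧ c.2 < h := by omega
              exact ⟨hb.1, hb.2.1, hb.2.2.1, hb.2.2.2, hd⟩
            have hlen := nds_len_le
              ((PySem.List.pyGet? ((PySem.List.pyGet? board c.2).getD []) c.1).getD ' ') d
            simp only [List.length_append, List.length_map, List.length_cons] at hN ⊢
            omega
          · rw [dif_neg hd, dif_neg hd]
            exact ihN rest seen1 cells seen2 (by simp at hN ⊢; omega) hmem

-- pushing the children of one processed state for B matches A's fold of recursive calls
theorem bisimQ (board : List (List Char)) (w h : Int) (n fuel : Nat)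
    (hP : ∀ (st : pvSt) (rest : List pvSt) (v : pvVis) (seen : PySem.Set pvSt)
      (cells : PySem.Set (Int × Int)),
      InvD v seen cells → muA w h v ≤ n → muA w h v < fuel → st.2 ∈ dirs4 →
      loopB board w h (st :: rest) seen cells
        = loopB board w h rest (pairsOf (travA board fuel st.1 st.2 v))
            (travA board fuel st.1 st.2 v).keys) :
    ∀ (l : List (Int × Int)) (cx cy : Int) (rest : List pvSt) (v : pvVis),
      (∀ nd ∈ l, nd ∈ dirs4) → v.keys.Nodup → muA w h v ≤ n → muA w h v < fuel →
      loopB board w h (l.map (fun nd => ((cx + nd.1, cy + nd.2), nd)) ++ rest)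
          (pairsOf v) v.keys
        = loopB board w h rest
            (pairsOf (l.foldl
              (fun acc dir => travA board fuel (cx + dir.1, cy + dir.2) dir acc) v))
            (l.foldl (fun acc dir => travA board fuel (cx + dir.1, cy + dir.2) dir acc) v).keys
    := by
  intro l cx cy
  induction l with
  | nil =>
    intro rest v _ _ _ _
    simp only [List.map_nil, List.nil_append, List.foldl_nil]
  | cons a t iht =>
    intro rest v hdirs hnd hn hfuel
    simp only [List.map_cons, List.cons_append, List.foldl_cons]
    rw [hP ((cx + a.1, cy + a.2), a) (t.map (fun nd => ((cx + nd.1, cy + nd.2), nd)) ++ rest) v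
      (pairsOf v) v.keys (InvD_canonical hnd) hn hfuel (hdirs a (by simp))]
    exact iht rest _ (fun nd hnd' => hdirs nd (by simp [hnd']))
      ((travA_mono board fuel _ _ v).2 hnd)
      (le_trans (muA_travA_le board w h fuel _ _ v) hn)
      (lt_of_le_of_lt (muA_travA_le board w h fuel _ _ v) hfuel)

-- the key bisimulation: one recursive call of A matches pushing one state for B
theorem bisimP (board : List (List Char)) (hB : BoardOK board) (w h : Int)
    (hw : w = boardW board) (hh : h = PySem.List.len board) :
    ∀ (n fuel : Nat) (st : pvSt) (rest : List pvSt) (v : pvVis)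
      (seen : PySem.Set pvSt) (cells : PySem.Set (Int × Int)),
      InvD v seen cells → muA w h v ≤ n → muA w h v < fuel → st.2 ∈ dirs4 →
      loopB board w h (st :: rest) seen cells
        = loopB board w h rest (pairsOf (travA board fuel st.1 st.2 v))
            (travA board fuel st.1 st.2 v).keys := by
  intro n
  induction n using Nat.strongRecOn with
  | ind n IH =>
    intro fuel st rest v seen cells hInv hn hfuel hdir
    obtain ⟨hnd, hcells, hseen⟩ := hInv
    subst hcells
    obtain ⟨⟨cx, cy⟩, d⟩ := st
    cases fuel with
    | zero => omega
    | succ f =>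
      have hwl : PySem.List.len ((PySem.List.pyGet? board 0).getD []) = w := by
        rw [hw]; rfl
      have hhl : PySem.List.len board = h := by rw [hh]
      simp only [travA, loopB, hwl, hhl]
      by_cases hoob : cx < 0 ∨ cy < 0 ∨ cy ≥ h ∨ cx ≥ w
      · rw [if_pos (show cx < 0 ∨ cy < 0 ∨ cy > h - 1 ∨ cx > w - 1 by omega), if_pos hoob]
        exact loopB_congr board w h _ rest seen v.keys (pairsOf v) le_rfl
          (fun q => by rw [hseen q, mem_pairsOf hnd q])
      · rw [if_neg (show ¬(cx < 0 ∨ cy < 0 ∨ cy > h - 1 ∨ cx > w - 1) by omega),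
          if_neg hoob]
        have hdir' : d ∈ dirs4 := hdir
        by_cases hpm : pairMem v ((cx, cy), d) = true
        · have hct : v.contains (cx, cy) = true := by
            cases hcc : v.contains (cx, cy) with
            | true => rfl
            | false =>
              rw [pairMem, PySem.Dict.getD_of_not_contains v _ hcc] at hpm
              simp at hpm
          have hAc : ¬ (PySem.Dict.contains v (cx, cy) = false) := by simp [hct]
          have hgetd : d ∈ v.getD (cx, cy) [] := by simpa [pairMem] using hpm
          have hBs : ((cx, cy), d) ∈ seen := (hseen _).mpr hpm
          rw [if_neg hAc, if_pos hgetd, if_pos hBs]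
          exact loopB_congr board w h _ rest seen v.keys (pairsOf v) le_rfl
            (fun q => by rw [hseen q, mem_pairsOf hnd q])
        · have hpm' : pairMem v ((cx, cy), d) = false := by simpa using hpm
          have hb : (0:Int) ≤ cx ∧ cx < w ∧ 0 ≤ cy ∧ cy < h := by omega
          have hsg := sym_good hB (x := cx) (y := cy)
            ⟨hb.1, by rw [← hw]; exact hb.2.1⟩ ⟨hb.2.2.1, by rw [hhl]; exact hb.2.2.2⟩
          obtain ⟨nds, hnds, hgood⟩ := newDirections_good hsg hdir'
          have hBs : ¬ ((cx, cy), d) ∈ seen := fun hx => hpm ((hseen _).mp hx)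
          rw [if_neg hBs, dif_pos hdir']
          simp only [hnds, Option.getD_some]
          have hlt := muA_stepV_lt (w := w) (h := h) hb hdir' hpm'
          have hQ := bisimQ board w h (n - 1) f
            (fun st' rest' v' seen' cells' hI hn' hf' hd' =>
              IH (n - 1) (by omega) f st' rest' v' seen' cells' hI hn' hf' hd')
            nds cx cy rest (stepV v (cx, cy) d) hgood (nodup_stepV _ _ hnd)
            (by omega) (by omega)
          have hcongr : ∀ q : pvSt, q ∈ PySem.Set.add seen ((cx, cy), d)
              ↔ q ∈ pairsOf (stepV v (cx, cy) d) := fun q => by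
            rw [PySem.Set.mem_add, mem_pairsOf (nodup_stepV _ _ hnd) q]
            simp only [pairMem_stepV, Bool.or_eq_true, decide_eq_true_eq, hseen q]
          by_cases hcf : v.contains (cx, cy) = false
          · rw [if_pos hcf]
            have hv2 : (v.insert (cx, cy) [d]).modify (cx, cy) [] (fun l => l ++ [d])
                = stepV v (cx, cy) d := by rw [stepV, if_pos hcf]
            rw [hv2]
            have hcm : (cx, cy) ∉ v.keys := fun hmem =>
              (by simp [((PySem.Dict.contains_iff_mem_keys v _).mpr hmem)] at hcf)
            have hcells2 : PySem.Set.add v.keys (cx, cy) = (stepV v (cx, cy) d).keys := by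
              rw [PySem.Set.add_of_not_mem hcm, keys_stepV, if_neg (by simp [hcf])]
            rw [hcells2, loopB_congr board w h _ _ (PySem.Set.add seen ((cx, cy), d))
              (stepV v (cx, cy) d).keys (pairsOf (stepV v (cx, cy) d)) le_rfl hcongr]
            exact hQ
          · have hgetd' : ¬ d ∈ v.getD (cx, cy) [] := by simpa [pairMem] using hpm'
            rw [if_neg hcf, if_neg hgetd']
            have hct : v.contains (cx, cy) = true := by simpa using hcf
            have hv2 : v.modify (cx, cy) [] (fun l => l ++ [d]) = stepV v (cx, cy) d := by
              rw [stepV, if_neg hcf]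
            rw [hv2]
            have hcells2 : PySem.Set.add v.keys (cx, cy) = (stepV v (cx, cy) d).keys := by
              rw [PySem.Set.add_of_mem ((PySem.Dict.contains_iff_mem_keys v _).mp hct),
                keys_stepV, if_pos hct]
            rw [hcells2, loopB_congr board w h _ _ (PySem.Set.add seen ((cx, cy), d))
              (stepV v (cx, cy) d).keys (pairsOf (stepV v (cx, cy) d)) le_rfl hcongr]
            exact hQ

theorem traverse_eq (board : List (List Char)) (hB : BoardOK board) (c d : Int × Int)
    (hd : d ∈ dirs4)
    (hc : 0 ≤ c.1 ∧ c.1 < boardW board ∧ 0 ≤ c.2 ∧ c.2 < PySem.List.len board) :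
    traverseA c d board = some (traverseB c d board) := by
  have hInv : InvD PySem.Dict.empty PySem.Set.empty PySem.Set.empty := by
    refine ⟨PySem.Dict.nodup_keys_empty, rfl, fun st => ?_⟩
    simp [pairMem_empty, PySem.Set.empty]
  have hmu : muA (boardW board) (PySem.List.len board) PySem.Dict.empty
      ≤ (allStates (boardW board) (PySem.List.len board)).length := List.countP_le_length
  have h1 := bisimP board hB (boardW board) (PySem.List.len board) rfl rfl
    ((allStates (boardW board) (PySem.List.len board)).length)
    ((allStates (boardW board) (PySem.List.len board)).length + 1)
    (c, d) [] PySem.Dict.empty PySem.Set.empty PySem.Set.empty hInv hmu (by omega) hd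
  simp only [traverseA, traverseB,
    show PySem.List.len ((PySem.List.pyGet? board 0).getD []) = boardW board from rfl]
  rw [if_neg (by omega)]
  rw [h1, loopB]
  simp [PySem.Set.len, PySem.List.len, PySem.Dict.size, PySem.Dict.keys]

theorem parse_inner (cs : List Char) : ∀ (pre : List (List Char)) (row : List Char)
    (i : Int), i = (pre.length : Int) →
    cs.foldl (fun b c => PySem.List.pySetD b i (PySem.List.pyGetD b i [] ++ [c]))
      (pre ++ [row]) = pre ++ [row ++ cs] := by
  induction cs with
  | nil => intro pre row i hi; simp
  | cons c t ih =>
    intro pre row i hi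
    subst hi
    simp only [List.foldl_cons]
    have hget : PySem.List.pyGetD (pre ++ [row]) (pre.length : Int) [] = row := by
      rw [PySem.List.pyGetD_natCast]
      simp [List.getD_eq_getElem?_getD]
    have hset : PySem.List.pySetD (pre ++ [row])
        ((pre.length : Nat) : Int) (row ++ [c]) = pre ++ [row ++ [c]] := by
      rw [PySem.List.pySetD_natCast]
      simp
    rw [hget, hset, ih pre (row ++ [c]) _ rfl]
    simp

theorem parse_outer (lines : List String) : ∀ (k : Nat), k ≤ lines.length →
    ((PySem.List.pyRange 0 (k : Int) 1).foldl
      (fun board y =>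
        (((PySem.List.pyGet? lines y).getD "").toList).foldl
          (fun b c => PySem.List.pySetD b y (PySem.List.pyGetD b y [] ++ [c]))
          (board ++ [([] : List Char)]))
      [])
      = (lines.take k).map (fun line => line.toList) := by
  intro k
  induction k with
  | zero => simp [PySem.List.pyRange_one_eq_nil]
  | succ k ih =>
    intro hk
    rw [show ((k + 1 : Nat) : Int) = (k : Int) + 1 by push_cast; ring,
      PySem.List.pyRange_one_succ_right (by positivity), List.foldl_append, ih (by omega)]
    simp only [List.foldl_cons, List.foldl_nil]
    have hline : (PySem.List.pyGet? lines (k : Int)).getD "" = lines[k] := by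
      rw [PySem.List.pyGet?_natCast, List.getElem?_eq_getElem (by omega)]
      rfl
    rw [hline, parse_inner _ ((lines.take k).map (fun line => line.toList)) []
      (k : Int) (by simp; omega)]
    rw [List.take_add_one, List.getElem?_eq_getElem (show k < lines.length by omega)]
    simp
    rw [List.take_add_one, List.getElem?_map,
      List.getElem?_eq_getElem (show k < lines.length by omega)]
    simp
    rfl

theorem parse_eq (s : String) :
    parseA s = (PySem.Str.splitlines (PySem.Str.strip s)).map (fun line => line.toList) := by
  have h := parse_outer (PySem.Str.splitlines (PySem.Str.strip s))
    (PySem.Str.splitlines (PySem.Str.strip s)).length le_rfl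
  rw [List.take_length] at h
  unfold parseA
  simp only [PySem.List.len_eq]
  exact h

theorem pre_boardOK {s : String} (hp : Pre_solve s) : BoardOK (parseA s) := by
  rw [parse_eq]
  simp only [Pre_solve] at hp
  obtain ⟨hne, hw1, hrows⟩ := hp
  rcases hL : PySem.Str.splitlines (PySem.Str.strip s) with _ | ⟨l0, ls⟩
  · exact absurd hL hne
  · rw [hL] at hw1 hrows
    have hW : boardW ((l0 :: ls).map (fun line => line.toList))
        = (l0.toList.length : Int) := by
      simp [boardW, PySem.List.len]
    refine ⟨by simp, ?_, ?_⟩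
    · rw [hW]
      simp only [List.headD_cons] at hw1
      omega
    · intro row hrow
      simp only [List.mem_map] at hrow
      obtain ⟨line, hline, rfl⟩ := hrow
      have hli := hrows line hline
      simp only [List.headD_cons] at hli
      rw [hW]
      refine ⟨by simpa using hli.1, ?_⟩
      have h2 := hli.2
      rw [List.all_eq_true] at h2
      intro c hc
      have := h2 c (by simpa using hc)
      simpa using this


-- ===== VERDICT (by name: the statement is the Claim_ definition above) =====
set_option maxHeartbeats 2000000 in
theorem solve_spec : Claim_equal_solve := by
  intro s _ hp
  unfold Spec_solve
  have hBOK := pre_boardOK hp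
  simp only [solve, solve_alt]
  rw [show parseB s = parseA s from (parse_eq s).symm]
  generalize hbd : parseA s = board at *
  have hw1 : (1:Int) ≤ PySem.List.len ((PySem.List.pyGet? board 0).getD []) := hBOK.2.1
  have hh1 : (1:Int) ≤ PySem.List.len board := by
    have := List.length_pos_iff.mpr hBOK.1
    simp only [PySem.List.len_eq]
    omega
  set W := PySem.List.len ((PySem.List.pyGet? board 0).getD []) with hWd
  set H := PySem.List.len board with hHd
  have htrav : ∀ c d : Int × Int, d ∈ dirs4 → 0 ≤ c.1 → c.1 < W → 0 ≤ c.2 → c.2 < H →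
      traverseA c d board = some (traverseB c d board) := fun c d hd h1 h2 h3 h4 =>
    traverse_eq board hBOK c d hd ⟨h1, h2, h3, h4⟩
  rw [htrav (0, 0) (1, 0) (by decide) le_rfl (by omega) le_rfl (by omega)]
  simp only [Option.getD_some]
  rw [PySem.List.foldl_congr_mem (PySem.List.pyRange 0 W 1)
    (fun acc x => pyMaxOpt acc (traverseA (x, 0) (0, 1) board))
    (fun acc x => max acc (traverseB (x, 0) (0, 1) board)) _ (fun acc x hx => by
      obtain ⟨hx0, hxw⟩ := PySem.List.mem_pyRange_one.mp hx
      simp only [htrav (x, 0) (0, 1) (by decide) hx0 hxw le_rfl (by omega)]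
      rfl)]
  rw [PySem.List.foldl_congr_mem (PySem.List.pyRange 0 W 1)
    (fun acc x => pyMaxOpt acc (traverseA (x, H - 1) (0, -1) board))
    (fun acc x => max acc (traverseB (x, H - 1) (0, -1) board)) _ (fun acc x hx => by
      obtain ⟨hx0, hxw⟩ := PySem.List.mem_pyRange_one.mp hx
      simp only [htrav (x, H - 1) (0, -1) (by decide) hx0 hxw (by omega) (by omega)]
      rfl)]
  rw [PySem.List.foldl_congr_mem (PySem.List.pyRange 0 H 1)
    (fun acc y => pyMaxOpt acc (traverseA (0, y) (1, 0) board))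
    (fun acc y => max acc (traverseB (0, y) (1, 0) board)) _ (fun acc y hy => by
      obtain ⟨hy0, hyh⟩ := PySem.List.mem_pyRange_one.mp hy
      simp only [htrav (0, y) (1, 0) (by decide) le_rfl (by omega) hy0 hyh]
      rfl)]
  rw [PySem.List.foldl_congr_mem (PySem.List.pyRange 0 H 1)
    (fun acc y => pyMaxOpt acc (traverseA (W - 1, y) (-1, 0) board))
    (fun acc y => max acc (traverseB (W - 1, y) (-1, 0) board)) _ (fun acc y hy => by
      obtain ⟨hy0, hyh⟩ := PySem.List.mem_pyRange_one.mp hy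
      simp only [htrav (W - 1, y) (-1, 0) (by decide) (by omega) (by omega) hy0 hyh]
      rfl)]
  rw [PySem.List.max?_id_cons]
  simp only [Option.getD_some, List.map_append, List.map_map, List.foldl_append]
  rw [List.foldl_map, List.foldl_map, List.foldl_map, List.foldl_map]
  simp only [Function.comp_def]
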